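-- pv_equiv track=rewrite | github.com/UncleXuu/CS61A_2021fall | Projects/cats/cats.py | feline_flips
-- ===== SOURCE A (Python) =====
-- def feline_flips(start, goal, limit):
--     """A diff function for autocorrect that determines how many letters
--     in START need to be substituted to create GOAL, then adds the difference in
--     their lengths and returns the result.
--
--     Arguments:
--         start: a starting word
--         goal: a string representing a desired goal word
--         limit: a number representing an upper bound on the number of chars that must change
--
--     >>> big_limit = 10
--     >>> feline_flips("nice", "rice", big_limit)    # Substitute: n -> r
--     1
--     >>> feline_flips("range", "rungs", big_limit)  # Substitute: a -> u, e -> s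
--     2
--     >>> feline_flips("pill", "pillage", big_limit) # Don't substitute anything, length difference of 3.
--     3
--     >>> feline_flips("roses", "arose", big_limit)  # Substitute: r -> a, o -> r, s -> o, e -> s, s -> e
--     5
--     >>> feline_flips("rose", "hello", big_limit)   # Substitute: r->h, o->e, s->l, e->l, length difference of 1.
--     5
--     """
--     # BEGIN PROBLEM 6
--     if limit == -1:
--         return limit+1
--     elif limit != -1:
--         if len(start) == 0 and len(goal) == 0:
--             return 0
--         elif len(start) == 0 and len(goal) != 0:
--             return 1 + feline_flips([], goal[1:], limit-1)
--         elif len(start) != 0 and len(goal) == 0: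
--             return 1 + feline_flips(start[1:], [], limit-1)
--         else:
--             if start[0] == goal[0]:
--                 return 0 + feline_flips(start[1:], goal[1:], limit)
--             elif start[0] != goal[0]:
--                 return 1 + feline_flips(start[1:], goal[1:], limit-1)
-- ===== SOURCE B (Python) =====
-- def feline_flips(start, goal, limit):
--     # One index-based pass: each mismatched position (or position covered by
--     # only one of the words) costs one change; a budget of limit + 1 changes
--     # may be recorded before the count is cut off.
--     budget = limit + 1
--     changes = 0
--     i = 0
--     n = max(len(start), len(goal))
--     while i < n and budget != 0:
--         if i >= len(start) or i >= len(goal) or start[i] != goal[i]: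
--             changes += 1
--             budget -= 1
--         i += 1
--     return changes
-- ===== Notes on version B (the rewrite author's own statement) =====
-- stated objective: faster
-- what changed: Replaced the recursive slicing (which copies both strings at every step) with a single index-based while loop over the positions, tracking a decrementing budget of limit+1 recordable changes.
import Mathlib
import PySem

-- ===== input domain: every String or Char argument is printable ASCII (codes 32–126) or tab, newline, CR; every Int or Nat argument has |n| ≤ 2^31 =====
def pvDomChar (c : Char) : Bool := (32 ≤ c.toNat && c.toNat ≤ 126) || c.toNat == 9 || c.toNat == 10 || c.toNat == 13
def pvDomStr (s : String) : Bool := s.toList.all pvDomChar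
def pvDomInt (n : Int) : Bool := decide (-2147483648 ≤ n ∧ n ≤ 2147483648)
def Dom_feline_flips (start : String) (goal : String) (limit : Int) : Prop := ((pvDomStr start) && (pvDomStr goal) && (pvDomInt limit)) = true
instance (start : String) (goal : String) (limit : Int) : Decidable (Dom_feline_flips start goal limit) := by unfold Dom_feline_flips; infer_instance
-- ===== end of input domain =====

-- B replaces A's recursive slicing with one index-based pass tracking a decrementing change budget (objective: faster).

-- ===== PORT A =====
-- literal transliteration of A's recursion; string slicing done on the char list
def felineFlipsA : List Char → List Char → Int → Int
  | s, g, limit =>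
    if limit = -1 then limit + 1
    else
      match s, g with
      | [], [] => 0
      | [], _ :: gt => 1 + felineFlipsA [] gt (limit - 1)
      | _ :: st, [] => 1 + felineFlipsA st [] (limit - 1)
      | a :: st, b :: gt =>
        if a = b then 0 + felineFlipsA st gt limit
        else 1 + felineFlipsA st gt (limit - 1)
  termination_by s g _ => s.length + g.length
  decreasing_by all_goals (simp; try omega)

def feline_flips (start : String) (goal : String) (limit : Int) : Int :=
  felineFlipsA start.toList goal.toList limit

-- ===== PORT B =====
-- the while loop of Source B: state (i, budget, changes)
def felineFlipsBLoop (s g : List Char) (n : Nat) (i : Nat) (budget changes : Int) : Int :=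
  if i < n ∧ budget ≠ 0 then
    if s.length ≤ i ∨ g.length ≤ i ∨ s[i]? ≠ g[i]? then
      felineFlipsBLoop s g n (i + 1) (budget - 1) (changes + 1)
    else
      felineFlipsBLoop s g n (i + 1) budget changes
  else changes
  termination_by n - i
  decreasing_by all_goals omega

def feline_flips_alt (start : String) (goal : String) (limit : Int) : Int :=
  felineFlipsBLoop start.toList goal.toList (max start.toList.length goal.toList.length) 0 (limit + 1) 0

-- ===== PRECONDITION & SPEC =====
def Spec_feline_flips (start : String) (goal : String) (limit : Int) (out : Int) : Prop := out = feline_flips_alt start goal limit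
instance (start : String) (goal : String) (limit : Int) (out : Int) : Decidable (Spec_feline_flips start goal limit out) := by unfold Spec_feline_flips; infer_instance

-- ===== CLAIM (what is proved, stated in full; the proofs are below) =====
def Claim_equal_feline_flips : Prop := ∀ (start : String) (goal : String) (limit : Int), Dom_feline_flips start goal limit → Spec_feline_flips start goal limit (feline_flips start goal limit)

-- ===== LEMMAS AND PROOFS =====

-- unfolding lemmas for A's recursion
theorem felineFlipsA_neg_one (s g : List Char) : felineFlipsA s g (-1) = 0 := by
  rw [felineFlipsA.eq_def]
  dsimp only
  norm_num

theorem felineFlipsA_nil_nil (limit : Int) : felineFlipsA [] [] limit = 0 := by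
  rw [felineFlipsA.eq_def]
  dsimp only
  split_ifs <;> omega

theorem felineFlipsA_nil_cons (b : Char) (gt : List Char) (limit : Int) (h : limit ≠ -1) :
    felineFlipsA [] (b :: gt) limit = 1 + felineFlipsA [] gt (limit - 1) := by
  rw [felineFlipsA.eq_def]
  dsimp only
  rw [if_neg h]

theorem felineFlipsA_cons_nil (a : Char) (st : List Char) (limit : Int) (h : limit ≠ -1) :
    felineFlipsA (a :: st) [] limit = 1 + felineFlipsA st [] (limit - 1) := by
  rw [felineFlipsA.eq_def]
  dsimp only
  rw [if_neg h]

theorem felineFlipsA_cons_cons (a b : Char) (st gt : List Char) (limit : Int) (h : limit ≠ -1) :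
    felineFlipsA (a :: st) (b :: gt) limit =
      if a = b then 0 + felineFlipsA st gt limit else 1 + felineFlipsA st gt (limit - 1) := by
  rw [felineFlipsA.eq_def]
  dsimp only
  rw [if_neg h]

-- loop invariant: the remaining loop run computes A's recursion on the dropped suffixes
theorem felineFlipsBLoop_eq (s g : List Char) (i : Nat) (budget changes : Int) :
    felineFlipsBLoop s g (max s.length g.length) i budget changes
      = changes + felineFlipsA (s.drop i) (g.drop i) (budget - 1) := by
  by_cases hn : i < max s.length g.length
  · by_cases hb : budget = 0
    · rw [felineFlipsBLoop]
      rw [if_neg (by simp [hb])]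
      have : budget - 1 = -1 := by omega
      rw [this, felineFlipsA_neg_one]
      ring
    · have hA : budget - 1 ≠ -1 := by omega
      by_cases hs : s.length ≤ i
      · -- s exhausted; g must still have chars
        have hg : i < g.length := by omega
        have hds : s.drop i = [] := List.drop_of_length_le hs
        have hdg : g.drop i = g[i] :: g.drop (i + 1) := List.drop_eq_getElem_cons hg
        rw [felineFlipsBLoop]
        rw [if_pos ⟨hn, hb⟩, if_pos (Or.inl hs)]
        rw [felineFlipsBLoop_eq s g (i + 1) (budget - 1) (changes + 1)]
        rw [hds, hdg, felineFlipsA_nil_cons _ _ _ hA]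
        rw [List.drop_of_length_le (by omega : s.length ≤ i + 1)]
        ring
      · by_cases hg : g.length ≤ i
        · have hs' : i < s.length := by omega
          have hdg : g.drop i = [] := List.drop_of_length_le hg
          have hds : s.drop i = s[i] :: s.drop (i + 1) := List.drop_eq_getElem_cons hs'
          rw [felineFlipsBLoop]
          rw [if_pos ⟨hn, hb⟩, if_pos (Or.inr (Or.inl hg))]
          rw [felineFlipsBLoop_eq s g (i + 1) (budget - 1) (changes + 1)]
          rw [hds, hdg, felineFlipsA_cons_nil _ _ _ hA]
          rw [List.drop_of_length_le (by omega : g.length ≤ i + 1)]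
          ring
        · have hs' : i < s.length := by omega
          have hg' : i < g.length := by omega
          have hds : s.drop i = s[i] :: s.drop (i + 1) := List.drop_eq_getElem_cons hs'
          have hdg : g.drop i = g[i] :: g.drop (i + 1) := List.drop_eq_getElem_cons hg'
          have hso : s[i]? = some s[i] := List.getElem?_eq_getElem hs'
          have hgo : g[i]? = some g[i] := List.getElem?_eq_getElem hg'
          by_cases hc : s[i] = g[i]
          · rw [felineFlipsBLoop]
            rw [if_pos ⟨hn, hb⟩,
                if_neg (by simp [hs, hg, hso, hgo, hc])]
            rw [felineFlipsBLoop_eq s g (i + 1) budget changes]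
            rw [hds, hdg, felineFlipsA_cons_cons _ _ _ _ _ hA, if_pos hc]
            ring
          · rw [felineFlipsBLoop]
            rw [if_pos ⟨hn, hb⟩,
                if_pos (Or.inr (Or.inr (by simp [hso, hgo, hc])))]
            rw [felineFlipsBLoop_eq s g (i + 1) (budget - 1) (changes + 1)]
            rw [hds, hdg, felineFlipsA_cons_cons _ _ _ _ _ hA, if_neg hc]
            ring
  · have hs : s.drop i = [] := List.drop_of_length_le (by omega)
    have hg : g.drop i = [] := List.drop_of_length_le (by omega)
    rw [felineFlipsBLoop]
    rw [if_neg (by omega)]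
    rw [hs, hg, felineFlipsA_nil_nil]
    ring
  termination_by (max s.length g.length) - i
  decreasing_by all_goals omega

-- ===== VERDICT (by name: the statement is the Claim_ definition above) =====
theorem feline_flips_spec : Claim_equal_feline_flips := by
  intro start goal limit _
  unfold Spec_feline_flips feline_flips feline_flips_alt
  rw [felineFlipsBLoop_eq]
  simp
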